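-- pv_equiv track=rewrite | github.com/Derlon20/table12 | swiss_logic.py | compute_buchholz_wl
-- ===== SOURCE A (Python) =====
-- from collections import defaultdict
-- from typing import List, Dict, Tuple, Set, Optional
--
-- def compute_wins_losses_from_log(players: List[str], match_log: List[Dict]) -> Tuple[Dict[str, int], Dict[str, int]]:
--     """Count wins and losses for each player based on match_log."""
--     wins = {p: 0 for p in players}
--     losses = {p: 0 for p in players}
--     for m in match_log:
--         a, b, w = m["a"], m["b"], m["winner"]
--         wins[w] += 1
--         loser = b if w == a else a
--         losses[loser] += 1
--     return wins, losses
--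
-- def compute_buchholz_wl(players: List[str], match_log: List[Dict]) -> Dict[str, int]:
--     """
--     New Buchholz: for each player, sum over unique opponents of (opponent_wins - opponent_losses).
--     Uses match_log to derive opponents and each opponent's W/L.
--     """
--     opponents = defaultdict(set)
--     for m in match_log:
--         a, b = m["a"], m["b"]
--         opponents[a].add(b)
--         opponents[b].add(a)
--
--     wins, losses = compute_wins_losses_from_log(players, match_log)
--     out: Dict[str, int] = {p: 0 for p in players}
--     for p in players:
--         total = 0
--         for opp in opponents.get(p, []):
--             total += wins.get(opp, 0) - losses.get(opp, 0)
--         out[p] = total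
--     return out
-- ===== SOURCE B (Python) =====
-- def compute_buchholz_wl(players, match_log):
--     # One pass builds net score (wins - losses); a second pass walks UNIQUE
--     # unordered opponent edges, adding each edge's contribution to both ends.
--     net = {}
--     for m in match_log:
--         a, b, w = m["a"], m["b"], m["winner"]
--         net[w] = net.get(w, 0) + 1
--         loser = b if w == a else a
--         net[loser] = net.get(loser, 0) - 1
--     out = {p: 0 for p in players}
--     seen = set()
--     for m in match_log:
--         a, b = m["a"], m["b"]
--         key = (a, b) if a <= b else (b, a)
--         if key in seen:
--             continue
--         seen.add(key)
--         if a == b: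
--             if a in out:
--                 out[a] += net.get(a, 0)
--         else:
--             if a in out:
--                 out[a] += net.get(b, 0)
--             if b in out:
--                 out[b] += net.get(a, 0)
--     return out
-- ===== Notes on version B (the rewrite author's own statement) =====
-- stated objective: alternative
-- what changed: Replaces A's per-player opponent-set dictionary plus nested per-player summation loop by a single net-score (wins minus losses) dict built in one pass and a single pass over unique unordered opponent edges that credits each new edge's contribution to both endpoints.
import Mathlib
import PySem

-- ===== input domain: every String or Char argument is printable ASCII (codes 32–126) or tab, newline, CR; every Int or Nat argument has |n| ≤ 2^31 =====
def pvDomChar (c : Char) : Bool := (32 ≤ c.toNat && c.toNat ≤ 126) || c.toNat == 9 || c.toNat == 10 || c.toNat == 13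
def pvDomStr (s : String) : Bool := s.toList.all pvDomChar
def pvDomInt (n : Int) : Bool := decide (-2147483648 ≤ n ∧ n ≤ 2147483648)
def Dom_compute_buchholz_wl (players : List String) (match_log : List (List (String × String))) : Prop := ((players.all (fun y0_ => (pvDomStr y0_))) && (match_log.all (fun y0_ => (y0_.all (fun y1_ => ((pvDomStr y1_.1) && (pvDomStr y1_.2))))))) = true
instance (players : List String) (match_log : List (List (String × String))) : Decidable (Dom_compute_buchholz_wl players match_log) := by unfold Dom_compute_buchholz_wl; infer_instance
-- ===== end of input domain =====

-- B replaces A's per-player loop over per-player opponent sets by a single pass over the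
-- unique unordered opponent edges of the log, pushing each edge's net-score contribution
-- to both endpoints (objective: alternative decomposition, same asymptotic cost).

-- ===== shared accessors (m["a"], m["b"], m["winner"], loser; KeyError excluded by Pre_) =====
def pvKey (m : List (String × String)) (k : String) : String :=
  ((m.find? (fun kv => kv.1 == k)).map (fun kv => kv.2)).getD ""
def pvA (m : List (String × String)) : String := pvKey m "a"
def pvB (m : List (String × String)) : String := pvKey m "b"
def pvW (m : List (String × String)) : String := pvKey m "winner"
def pvL (m : List (String × String)) : String := if pvW m = pvA m then pvB m else pvA m
-- {p: 0 for p in players} (used by both programs)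
def pvInit0 (players : List String) : PySem.Dict String Int :=
  players.foldl (fun d p => d.insert p 0) PySem.Dict.empty

-- ===== PORT A =====
-- opponents = defaultdict(set); opponents[a].add(b); opponents[b].add(a)
def pvOpponents (match_log : List (List (String × String))) : PySem.Dict String (PySem.Set String) :=
  match_log.foldl
    (fun d m => (d.modify (pvA m) [] (fun s => PySem.Set.add s (pvB m))).modify (pvB m) []
      (fun s => PySem.Set.add s (pvA m)))
    PySem.Dict.empty
-- compute_wins_losses_from_log: wins[w] += 1; losses[loser] += 1 (KeyError outside Pre_)
def pvWL (players : List String) (match_log : List (List (String × String))) :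
    PySem.Dict String Int × PySem.Dict String Int :=
  match_log.foldl
    (fun wl m => (wl.1.insert (pvW m) (wl.1.getD (pvW m) 0 + 1),
                  wl.2.insert (pvL m) (wl.2.getD (pvL m) 0 + 1)))
    (pvInit0 players, pvInit0 players)
-- total = sum over opponents.get(p, []) of wins.get(opp,0) - losses.get(opp,0)
def pvTotalA (opp : PySem.Dict String (PySem.Set String))
    (wl : PySem.Dict String Int × PySem.Dict String Int) (p : String) : Int :=
  (opp.getD p []).foldl (fun t o => t + (wl.1.getD o 0 - wl.2.getD o 0)) 0
-- out = {p: 0 for p in players}; for p in players: out[p] = total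
def pvOutA (players : List String) (opp : PySem.Dict String (PySem.Set String))
    (wl : PySem.Dict String Int × PySem.Dict String Int) : PySem.Dict String Int :=
  players.foldl (fun d p => d.insert p (pvTotalA opp wl p)) (pvInit0 players)

def compute_buchholz_wl (players : List String) (match_log : List (List (String × String))) :
    List (String × Int) :=
  (pvOutA players (pvOpponents match_log) (pvWL players match_log)).items

-- tuple(sorted((a, b))): the unordered pair key of an edge
def pvNKey (a b : String) : String × String := if a ≤ b then (a, b) else (b, a)

-- ===== PORT B =====
-- net[w] = net.get(w,0) + 1; net[loser] = net.get(loser,0) - 1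
def pvNetFold (match_log : List (List (String × String))) : PySem.Dict String Int :=
  match_log.foldl (fun n m => (n.modify (pvW m) 0 (· + 1)).modify (pvL m) 0 (· - 1))
    PySem.Dict.empty
-- one step of the edge pass: skip an already-seen unordered pair, else credit both ends
def pvEdgeStep (net : PySem.Dict String Int)
    (st : PySem.Set (String × String) × PySem.Dict String Int)
    (m : List (String × String)) : PySem.Set (String × String) × PySem.Dict String Int :=
  let a := pvA m
  let b := pvB m
  let key := pvNKey a b
  if PySem.Set.contains st.1 key then st
  else
    let seen := PySem.Set.add st.1 key
    if a = b then
      (seen, if st.2.contains a then st.2.modify a 0 (· + net.getD a 0) else st.2)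
    else
      let o1 := if st.2.contains a then st.2.modify a 0 (· + net.getD b 0) else st.2
      let o2 := if o1.contains b then o1.modify b 0 (· + net.getD a 0) else o1
      (seen, o2)

def compute_buchholz_wl_alt (players : List String) (match_log : List (List (String × String))) :
    List (String × Int) :=
  (match_log.foldl (pvEdgeStep (pvNetFold match_log)) (PySem.Set.empty, pvInit0 players)).2.items

-- ===== PRECONDITION & SPEC =====
-- Pre_ excludes exactly the inputs on which Python A raises KeyError: a match missing one of
-- the keys "a"/"b"/"winner", or whose winner or loser is not in players (wins[w] / losses[loser]).
def Pre_compute_buchholz_wl (players : List String) (match_log : List (List (String × String))) : Prop :=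
  ∀ m ∈ match_log,
    (m.find? (fun kv => kv.1 == "a")).isSome = true ∧
    (m.find? (fun kv => kv.1 == "b")).isSome = true ∧
    (m.find? (fun kv => kv.1 == "winner")).isSome = true ∧
    pvW m ∈ players ∧ pvL m ∈ players
instance (players : List String) (match_log : List (List (String × String))) : Decidable (Pre_compute_buchholz_wl players match_log) := by unfold Pre_compute_buchholz_wl; infer_instance

def pvWitness_compute_buchholz_wl : List String × (List (List (String × String))) :=
  (["p", "q"], [[("a", "p"), ("b", "q"), ("winner", "p")]])

def Spec_compute_buchholz_wl (players : List String) (match_log : List (List (String × String))) (out : List (String × Int)) : Prop := out = compute_buchholz_wl_alt players match_log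
instance (players : List String) (match_log : List (List (String × String))) (out : List (String × Int)) : Decidable (Spec_compute_buchholz_wl players match_log out) := by unfold Spec_compute_buchholz_wl; infer_instance

-- ===== CLAIM (what is proved, stated in full; the proofs are below) =====
def Claim_equal_compute_buchholz_wl : Prop := ∀ (players : List String) (match_log : List (List (String × String))), Dom_compute_buchholz_wl players match_log → Pre_compute_buchholz_wl players match_log → Spec_compute_buchholz_wl players match_log (compute_buchholz_wl players match_log)

-- ===== LEMMAS AND PROOFS =====

-- proof-side vocabulary
-- all (possibly repeated) opponents of p in the log, in A's insertion order
def pvRaw (p : String) (l : List (List (String × String))) : List String :=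
  l.flatMap (fun m => (if pvA m = p then [pvB m] else []) ++ (if pvB m = p then [pvA m] else []))
def pvNet (l : List (List (String × String))) (q : String) : Int :=
  ((l.map pvW).count q : Int) - ((l.map pvL).count q : Int)

lemma pvNKey_comm (a b : String) : pvNKey a b = pvNKey b a := by
  unfold pvNKey
  rcases le_total a b with h | h
  · by_cases h' : b ≤ a
    · have : a = b := le_antisymm h h'
      subst this; simp
    · simp [h, h']
  · by_cases h' : a ≤ b
    · have : a = b := le_antisymm h' h
      subst this; simp
    · simp [h, h']

lemma pvNKey_right_inj {p q q' : String} (h : pvNKey p q = pvNKey p q') : q = q' := by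
  unfold pvNKey at h
  split_ifs at h <;> simp only [Prod.mk.injEq] at h
  · exact h.2
  · rw [h.2, h.1]
  · exact h.1.trans h.2
  · exact h.1

lemma pvNKey_mem {a b p q : String} (h : pvNKey a b = pvNKey p q) : p = a ∨ p = b := by
  unfold pvNKey at h
  split_ifs at h <;> simp only [Prod.mk.injEq] at h <;> tauto

-- {p: 0 for p in players}
lemma foldl_insert_fn_getD (f : String → Int) :
    ∀ (ps : List String) (d : PySem.Dict String Int) (q : String),
      (ps.foldl (fun d p => d.insert p (f p)) d).getD q 0 = if q ∈ ps then f q else d.getD q 0 := by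
  intro ps
  induction ps with
  | nil => simp
  | cons x t ih =>
    intro d q
    simp only [List.foldl_cons, ih, List.mem_cons]
    by_cases hq : q ∈ t
    · simp [hq]
    · by_cases hx : q = x <;> simp [hq, hx, PySem.Dict.getD_insert]

lemma pvInit0_getD (players : List String) (q : String) : (pvInit0 players).getD q 0 = 0 := by
  have h := foldl_insert_fn_getD (fun _ => 0) players PySem.Dict.empty q
  unfold pvInit0
  simpa using h

lemma pvInit0_keys (players : List String) : (pvInit0 players).keys = PySem.Set.ofList players := by
  have h := PySem.Dict.keys_foldl_insert players (fun _ _ => (0 : Int)) PySem.Dict.empty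
  unfold pvInit0
  simpa [PySem.Dict.keys_empty, PySem.Set.update_nil_left] using h

-- A's second loop: getD after inserting pvTotalA for each player
lemma pvOutA_getD (players : List String) (opp) (wl) (q : String) :
    (pvOutA players opp wl).getD q 0 = if q ∈ players then pvTotalA opp wl q else 0 := by
  unfold pvOutA
  rw [foldl_insert_fn_getD (pvTotalA opp wl) players (pvInit0 players) q]
  split <;> simp [pvInit0_getD]

lemma pvOutA_keys (players : List String) (opp) (wl) :
    (pvOutA players opp wl).keys = PySem.Set.ofList players := by
  have h := PySem.Dict.keys_foldl_insert players (fun _ p => pvTotalA opp wl p) (pvInit0 players)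
  unfold pvOutA
  have h2 : PySem.Set.update (PySem.Set.ofList players) players = PySem.Set.ofList players := by
    rw [PySem.Set.update_eq_append_filter]
    have : List.filter (fun y => !(PySem.Set.ofList players).contains y)
        (PySem.Set.ofList players) = [] := by
      apply List.filter_eq_nil_iff.mpr
      intro y hy
      simp [PySem.Set.contains_eq_listContains, hy]
    rw [this, List.append_nil]
  simpa [pvInit0_keys, h2] using h

-- opponents dict: value at p is the set of p's opponents
lemma pvOpponents_getD (l : List (List (String × String))) (p : String) :
    (pvOpponents l).getD p [] = PySem.Set.ofList (pvRaw p l) := by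
  have step : ∀ (m : List (String × String)) (d : PySem.Dict String (PySem.Set String)),
      ((d.modify (pvA m) [] (fun s => PySem.Set.add s (pvB m))).modify (pvB m) []
        (fun s => PySem.Set.add s (pvA m))).getD p []
      = PySem.Set.update (d.getD p [])
          ((if pvA m = p then [pvB m] else []) ++ (if pvB m = p then [pvA m] else [])) := by
    intro m d
    by_cases ha : p = pvA m <;> by_cases hb : p = pvB m
    · simp [← ha, ← hb, PySem.Set.update_cons, PySem.Set.update_nil]
    · have hb' : pvB m ≠ p := fun h => hb h.symm
      simp [PySem.Dict.getD_modify, ← ha, hb, hb', PySem.Set.update_cons, PySem.Set.update_nil]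
    · have ha' : pvA m ≠ p := fun h => ha h.symm
      have hba : pvB m ≠ pvA m := by rw [← hb]; exact ha
      simp [PySem.Dict.getD_modify, ha, ← hb, ha', PySem.Set.update_cons, PySem.Set.update_nil]
    · have ha' : pvA m ≠ p := fun h => ha h.symm
      have hb' : pvB m ≠ p := fun h => hb h.symm
      simp [PySem.Dict.getD_modify, ha, hb, ha', hb', PySem.Set.update_nil]
  have gen : ∀ (l : List (List (String × String))) (d : PySem.Dict String (PySem.Set String)),
      (l.foldl (fun d m => (d.modify (pvA m) [] (fun s => PySem.Set.add s (pvB m))).modify (pvB m) []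
        (fun s => PySem.Set.add s (pvA m))) d).getD p []
      = PySem.Set.update (d.getD p []) (pvRaw p l) := by
    intro l
    induction l with
    | nil => intro d; simp [pvRaw, PySem.Set.update_nil]
    | cons m t ih =>
      intro d
      simp only [List.foldl_cons]
      rw [ih, step]
      simp only [pvRaw, List.flatMap_cons, PySem.Set.update_append]
  unfold pvOpponents
  rw [gen]
  simp [PySem.Set.update_nil_left]

-- wins/losses counts
lemma pvWL_getD (players : List String) (l : List (List (String × String))) (q : String) :
    (pvWL players l).1.getD q 0 = ((l.map pvW).count q : Int) ∧
    (pvWL players l).2.getD q 0 = ((l.map pvL).count q : Int) := by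
  have gen : ∀ (l : List (List (String × String))) (d1 d2 : PySem.Dict String Int) (q : String),
      ((l.foldl (fun wl m => (wl.1.insert (pvW m) (wl.1.getD (pvW m) 0 + 1),
          wl.2.insert (pvL m) (wl.2.getD (pvL m) 0 + 1))) (d1, d2)).1.getD q 0
        = d1.getD q 0 + ((l.map pvW).count q : Int)) ∧
      ((l.foldl (fun wl m => (wl.1.insert (pvW m) (wl.1.getD (pvW m) 0 + 1),
          wl.2.insert (pvL m) (wl.2.getD (pvL m) 0 + 1))) (d1, d2)).2.getD q 0
        = d2.getD q 0 + ((l.map pvL).count q : Int)) := by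
    intro l
    induction l with
    | nil => intro d1 d2 q; simp
    | cons m t ih =>
      intro d1 d2 q
      simp only [List.foldl_cons]
      obtain ⟨h1, h2⟩ := ih (d1.insert (pvW m) (d1.getD (pvW m) 0 + 1))
        (d2.insert (pvL m) (d2.getD (pvL m) 0 + 1)) q
      refine ⟨?_, ?_⟩
      · rw [h1, PySem.Dict.getD_insert]
        simp only [List.map_cons, List.count_cons, beq_iff_eq]
        rcases eq_or_ne q (pvW m) with h | h
        · subst h; simp; all_goals omega
        · simp [h, Ne.symm h]
      · rw [h2, PySem.Dict.getD_insert]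
        simp only [List.map_cons, List.count_cons, beq_iff_eq]
        rcases eq_or_ne q (pvL m) with h | h
        · subst h; simp; all_goals omega
        · simp [h, Ne.symm h]
  have h := gen l (pvInit0 players) (pvInit0 players) q
  unfold pvWL
  simpa [pvInit0_getD] using h

-- B's net dict
lemma pvNetFold_getD (l : List (List (String × String))) (q : String) :
    (pvNetFold l).getD q 0 = pvNet l q := by
  have gen : ∀ (l : List (List (String × String))) (d : PySem.Dict String Int) (q : String),
      (l.foldl (fun n m => (n.modify (pvW m) 0 (· + 1)).modify (pvL m) 0 (· - 1)) d).getD q 0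
        = d.getD q 0 + ((l.map pvW).count q : Int) - ((l.map pvL).count q : Int) := by
    intro l
    induction l with
    | nil => intro d q; simp
    | cons m t ih =>
      intro d q
      simp only [List.foldl_cons]
      rw [ih]
      rcases eq_or_ne q (pvL m) with hl | hl
      · subst hl
        rcases eq_or_ne (pvL m) (pvW m) with hw | hw
        · rw [hw]
          simp [hw]
          all_goals omega
        · simp [PySem.Dict.getD_modify, hw, Ne.symm hw]
          all_goals omega
      · rcases eq_or_ne q (pvW m) with hw | hw
        · subst hw
          simp [PySem.Dict.getD_modify, hl, Ne.symm hl]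
          all_goals omega
        · simp [PySem.Dict.getD_modify, hl, hw, Ne.symm hl, Ne.symm hw]
  unfold pvNetFold pvNet
  rw [gen]
  simp

-- edge pass preserves the key list of out
lemma pvEdgeStep_keys (net) (st) (m) : (pvEdgeStep net st m).2.keys = st.2.keys := by
  simp only [pvEdgeStep]
  split_ifs <;>
    simp_all [PySem.Dict.keys_modify, PySem.Dict.keys_insert_of_contains,
      PySem.Dict.contains_modify]

lemma pvEdgeFold_keys (net) (l : List (List (String × String))) :
    ∀ (st : PySem.Set (String × String) × PySem.Dict String Int),
      ((l.foldl (pvEdgeStep net) st).2).keys = st.2.keys := by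
  induction l with
  | nil => intro st; simp
  | cons m t ih =>
    intro st
    simp only [List.foldl_cons]
    rw [ih, pvEdgeStep_keys]

-- finset bookkeeping for the edge pass
lemma pv_filter_step (p x : String) (k : String × String) (S : Finset String)
    (seen : PySem.Set (String × String)) (hkx : pvNKey p x = k) (hx : k ∉ seen) :
    ((insert x S).filter (fun q => pvNKey p q ∉ seen))
      = insert x (S.filter (fun q => pvNKey p q ∉ PySem.Set.add seen k)) := by
  subst hkx
  ext y
  simp only [Finset.mem_filter, Finset.mem_insert, PySem.Set.mem_add]
  constructor
  · rintro ⟨hy | hy, hns⟩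
    · left; exact hy
    · by_cases hxy : y = x
      · left; exact hxy
      · right; exact ⟨hy, fun h => h.elim hns (fun he => hxy (pvNKey_right_inj he))⟩
  · rintro (rfl | ⟨hy, hns⟩)
    · exact ⟨Or.inl rfl, hx⟩
    · exact ⟨Or.inr hy, fun h => hns (Or.inl h)⟩

lemma pv_notin_filter (p x : String) (k : String × String) (S : Finset String)
    (seen : PySem.Set (String × String)) (hkx : pvNKey p x = k) :
    x ∉ S.filter (fun q => pvNKey p q ∉ PySem.Set.add seen k) := by
  subst hkx
  intro h
  have := (Finset.mem_filter.1 h).2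
  exact this ((PySem.Set.mem_add seen (pvNKey p x) (pvNKey p x)).2 (Or.inr rfl))

lemma pv_filter_skip (p : String) (S : Finset String) (seen : PySem.Set (String × String))
    (k : String × String) (hno : ∀ q, pvNKey p q ≠ k) :
    S.filter (fun q => pvNKey p q ∉ PySem.Set.add seen k)
      = S.filter (fun q => pvNKey p q ∉ seen) := by
  ext y
  simp [Finset.mem_filter, PySem.Set.mem_add, hno y]

lemma pvEdgeStep_of_seen (net) (st : PySem.Set (String × String) × PySem.Dict String Int) (m)
    (h : pvNKey (pvA m) (pvB m) ∈ st.1) : pvEdgeStep net st m = st := by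
  simp only [pvEdgeStep]
  rw [(PySem.Set.contains_iff _ _).2 h]
  simp

lemma pvEdgeStep_seen (net) (st : PySem.Set (String × String) × PySem.Dict String Int) (m)
    (h : pvNKey (pvA m) (pvB m) ∉ st.1) :
    (pvEdgeStep net st m).1 = PySem.Set.add st.1 (pvNKey (pvA m) (pvB m)) := by
  simp only [pvEdgeStep]
  rw [Bool.eq_false_iff.mpr (fun hh => h ((PySem.Set.contains_iff _ _).1 hh))]
  simp only [Bool.false_eq_true, if_false]
  split <;> rfl

lemma pvEdgeStep_out (net) (st : PySem.Set (String × String) × PySem.Dict String Int) (m)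
    (h : pvNKey (pvA m) (pvB m) ∉ st.1) :
    (pvEdgeStep net st m).2 =
      if pvA m = pvB m then
        (if st.2.contains (pvA m) then st.2.modify (pvA m) 0 (· + net.getD (pvA m) 0) else st.2)
      else
        (if (if st.2.contains (pvA m) then st.2.modify (pvA m) 0 (· + net.getD (pvB m) 0)
              else st.2).contains (pvB m) then
           (if st.2.contains (pvA m) then st.2.modify (pvA m) 0 (· + net.getD (pvB m) 0)
              else st.2).modify (pvB m) 0 (· + net.getD (pvA m) 0)
         else
           (if st.2.contains (pvA m) then st.2.modify (pvA m) 0 (· + net.getD (pvB m) 0)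
              else st.2)) := by
  simp only [pvEdgeStep]
  rw [Bool.eq_false_iff.mpr (fun hh => h ((PySem.Set.contains_iff _ _).1 hh))]
  simp only [Bool.false_eq_true, if_false]
  split <;> rfl

-- the edge-pass invariant
lemma pvEdgeFold_getD (net : PySem.Dict String Int) (p : String) :
    ∀ (l : List (List (String × String)))
      (st : PySem.Set (String × String) × PySem.Dict String Int),
      st.2.contains p = true →
      ((l.foldl (pvEdgeStep net) st).2).getD p 0
        = st.2.getD p 0 +
          ∑ q ∈ ((pvRaw p l).toFinset.filter (fun q => pvNKey p q ∉ st.1)), net.getD q 0 := by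
  intro l
  induction l with
  | nil => intro st h; simp [pvRaw]
  | cons m t ih =>
    intro st hp
    simp only [List.foldl_cons]
    have hp' : (pvEdgeStep net st m).2.contains p = true := by
      rw [PySem.Dict.contains_iff_mem_keys] at hp ⊢
      rw [pvEdgeStep_keys]; exact hp
    rw [ih (pvEdgeStep net st m) hp']
    have hraw : pvRaw p (m :: t)
        = ((if pvA m = p then [pvB m] else []) ++ (if pvB m = p then [pvA m] else []))
          ++ pvRaw p t := by
      simp [pvRaw]
    have hkey_raw : ∀ q, q ∈ ((if pvA m = p then [pvB m] else []) ++ (if pvB m = p then [pvA m] else [])) →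
        pvNKey p q = pvNKey (pvA m) (pvB m) := by
      intro q hq
      rcases List.mem_append.1 hq with h | h
      · split_ifs at h with h1
        · simp only [List.mem_singleton] at h; subst h; rw [← h1]
        · simp at h
      · split_ifs at h with h1
        · simp only [List.mem_singleton] at h; subst h; rw [← h1, pvNKey_comm]
        · simp at h
    by_cases hk : pvNKey (pvA m) (pvB m) ∈ st.1
    · -- already-seen edge: state unchanged, and all of m's contributions are filtered out
      rw [pvEdgeStep_of_seen net st m hk, hraw]
      congr 1
      rw [List.toFinset_append, Finset.filter_union]
      have hempty : ((if pvA m = p then [pvB m] else []) ++ (if pvB m = p then [pvA m] else [])).toFinset.filter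
          (fun q => pvNKey p q ∉ st.1) = ∅ := by
        apply Finset.filter_eq_empty_iff.mpr
        intro x hx hmem
        exact hmem (hkey_raw x (List.mem_toFinset.1 hx) ▸ hk)
      rw [hempty, Finset.empty_union]
    · -- new edge
      rw [pvEdgeStep_seen net st m hk, pvEdgeStep_out net st m hk, hraw]
      by_cases hab : pvA m = pvB m
      · rw [if_pos hab]
        by_cases hpa : p = pvA m
        · -- self edge on p: p gains net[p] once
          have e1 : pvA m = p := hpa.symm
          have e2 : pvB m = p := hab.symm.trans e1
          rw [e1, e2]
          have hkm' : pvNKey p p ∉ st.1 := by rwa [e1, e2] at hk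
          have hgd : (if st.2.contains p then st.2.modify p 0 (· + net.getD p 0) else st.2).getD p 0
              = st.2.getD p 0 + net.getD p 0 := by
            simp [hp]
          rw [hgd]
          have hfin : (((if p = p then [p] else []) ++ (if p = p then [p] else [])) ++ pvRaw p t).toFinset
              = insert p (pvRaw p t).toFinset := by simp
          rw [hfin, pv_filter_step p p (pvNKey p p) _ st.1 rfl hkm',
            Finset.sum_insert (pv_notin_filter p p (pvNKey p p) _ st.1 rfl)]
          ring
        · -- self edge elsewhere: p unaffected
          have c1 : ¬ (pvA m = p) := fun h => hpa h.symm
          have c2 : ¬ (pvB m = p) := fun h => hpa (hab.trans h).symm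
          have hno : ∀ q, pvNKey p q ≠ pvNKey (pvA m) (pvB m) := by
            intro q h
            rcases pvNKey_mem h.symm with h1 | h1
            · exact hpa h1
            · exact c2 h1.symm
          have hgd : (if st.2.contains (pvA m) then st.2.modify (pvA m) 0 (· + net.getD (pvA m) 0)
              else st.2).getD p 0 = st.2.getD p 0 := by
            by_cases hca : st.2.contains (pvA m) = true <;>
              simp [hca, PySem.Dict.getD_modify, hpa]
          rw [hgd]
          have hfin : (((if pvA m = p then [pvB m] else []) ++ (if pvB m = p then [pvA m] else []))
              ++ pvRaw p t).toFinset = (pvRaw p t).toFinset := by simp [c1, c2]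
          rw [hfin, pv_filter_skip p _ st.1 _ hno]
      · rw [if_neg hab]
        by_cases hpa : p = pvA m
        · -- p == a: p gains net[b]
          have hpb : ¬ (p = pvB m) := fun h => hab (hpa.symm.trans h)
          have c2 : ¬ (pvB m = p) := fun h => hpb h.symm
          have hca : st.2.contains (pvA m) = true := by rw [← hpa]; exact hp
          have hkx : pvNKey p (pvB m) = pvNKey (pvA m) (pvB m) := by rw [hpa]
          have hgd : (if (if st.2.contains (pvA m) then st.2.modify (pvA m) 0 (· + net.getD (pvB m) 0)
              else st.2).contains (pvB m) then
              (if st.2.contains (pvA m) then st.2.modify (pvA m) 0 (· + net.getD (pvB m) 0)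
              else st.2).modify (pvB m) 0 (· + net.getD (pvA m) 0)
              else (if st.2.contains (pvA m) then st.2.modify (pvA m) 0 (· + net.getD (pvB m) 0)
              else st.2)).getD p 0 = st.2.getD p 0 + net.getD (pvB m) 0 := by
            simp only [hca, if_true]
            by_cases hcb : (st.2.modify (pvA m) 0 (· + net.getD (pvB m) 0)).contains (pvB m) = true <;>
              simp [hcb, PySem.Dict.getD_modify, hpa, hab]
          rw [hgd]
          have hfin : (((if pvA m = p then [pvB m] else []) ++ (if pvB m = p then [pvA m] else []))
              ++ pvRaw p t).toFinset = insert (pvB m) (pvRaw p t).toFinset := by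
            simp [hpa.symm, c2]
          rw [hfin, pv_filter_step p (pvB m) (pvNKey (pvA m) (pvB m)) _ st.1 hkx hk,
            Finset.sum_insert (pv_notin_filter p (pvB m) (pvNKey (pvA m) (pvB m)) _ st.1 hkx)]
          ring
        · by_cases hpb : p = pvB m
          · -- p == b: p gains net[a]
            have c1 : ¬ (pvA m = p) := fun h => hpa h.symm
            have hba : ¬ (pvB m = pvA m) := fun h => hab h.symm
            have hcb : st.2.contains (pvB m) = true := by rw [← hpb]; exact hp
            have hkx : pvNKey p (pvA m) = pvNKey (pvA m) (pvB m) := by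
              rw [hpb, pvNKey_comm]
            have hgd : (if (if st.2.contains (pvA m) then st.2.modify (pvA m) 0 (· + net.getD (pvB m) 0)
                else st.2).contains (pvB m) then
                (if st.2.contains (pvA m) then st.2.modify (pvA m) 0 (· + net.getD (pvB m) 0)
                else st.2).modify (pvB m) 0 (· + net.getD (pvA m) 0)
                else (if st.2.contains (pvA m) then st.2.modify (pvA m) 0 (· + net.getD (pvB m) 0)
                else st.2)).getD p 0 = st.2.getD p 0 + net.getD (pvA m) 0 := by
              by_cases hca : st.2.contains (pvA m) = true <;>
                simp [hca, hcb, PySem.Dict.contains_modify, PySem.Dict.getD_modify, hpb, hba]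
            rw [hgd]
            have hfin : (((if pvA m = p then [pvB m] else []) ++ (if pvB m = p then [pvA m] else []))
                ++ pvRaw p t).toFinset = insert (pvA m) (pvRaw p t).toFinset := by
              simp [c1, hpb.symm]
            rw [hfin, pv_filter_step p (pvA m) (pvNKey (pvA m) (pvB m)) _ st.1 hkx hk,
              Finset.sum_insert (pv_notin_filter p (pvA m) (pvNKey (pvA m) (pvB m)) _ st.1 hkx)]
            ring
          · -- p uninvolved
            have c1 : ¬ (pvA m = p) := fun h => hpa h.symm
            have c2 : ¬ (pvB m = p) := fun h => hpb h.symm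
            have hno : ∀ q, pvNKey p q ≠ pvNKey (pvA m) (pvB m) := by
              intro q h
              rcases pvNKey_mem h.symm with h1 | h1
              · exact hpa h1
              · exact hpb h1
            have hgd : (if (if st.2.contains (pvA m) then st.2.modify (pvA m) 0 (· + net.getD (pvB m) 0)
                else st.2).contains (pvB m) then
                (if st.2.contains (pvA m) then st.2.modify (pvA m) 0 (· + net.getD (pvB m) 0)
                else st.2).modify (pvB m) 0 (· + net.getD (pvA m) 0)
                else (if st.2.contains (pvA m) then st.2.modify (pvA m) 0 (· + net.getD (pvB m) 0)
                else st.2)).getD p 0 = st.2.getD p 0 := by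
              by_cases hca : st.2.contains (pvA m) = true <;>
                by_cases hcb : (if st.2.contains (pvA m) then st.2.modify (pvA m) 0 (· + net.getD (pvB m) 0)
                  else st.2).contains (pvB m) = true <;>
                simp_all [PySem.Dict.getD_modify]
            rw [hgd]
            have hfin : (((if pvA m = p then [pvB m] else []) ++ (if pvB m = p then [pvA m] else []))
                ++ pvRaw p t).toFinset = (pvRaw p t).toFinset := by simp [c1, c2]
            rw [hfin, pv_filter_skip p _ st.1 _ hno]

-- per-player agreement
lemma pv_value_eq (players : List String) (l : List (List (String × String))) (p : String)
    (hp : p ∈ players) :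
    (pvOutA players (pvOpponents l) (pvWL players l)).getD p 0
      = ((l.foldl (pvEdgeStep (pvNetFold l)) (PySem.Set.empty, pvInit0 players)).2).getD p 0 := by
  have hpc : (pvInit0 players).contains p = true := by
    rw [PySem.Dict.contains_iff_mem_keys, pvInit0_keys]
    simpa [PySem.Set.mem_ofList] using hp
  rw [pvEdgeFold_getD (pvNetFold l) p l (PySem.Set.empty, pvInit0 players) hpc]
  simp only []
  rw [pvOutA_getD, if_pos hp, pvInit0_getD]
  unfold pvTotalA
  rw [pvOpponents_getD, PySem.List.foldl_add,
    ← List.sum_toFinset _ (PySem.Set.nodup_ofList (pvRaw p l))]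
  have hfs : (PySem.Set.ofList (pvRaw p l)).toFinset = (pvRaw p l).toFinset := by
    ext x; simp [List.mem_toFinset, PySem.Set.mem_ofList]
  rw [hfs]
  have hfilter : (pvRaw p l).toFinset.filter
      (fun q => pvNKey p q ∉ (PySem.Set.empty : PySem.Set (String × String)))
      = (pvRaw p l).toFinset := by
    apply Finset.filter_true_of_mem
    intro x _
    simp [PySem.Set.empty]
  rw [hfilter]
  have hsum : ∀ q ∈ (pvRaw p l).toFinset,
      (pvWL players l).1.getD q 0 - (pvWL players l).2.getD q 0 = (pvNetFold l).getD q 0 := by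
    intro q _
    rw [(pvWL_getD players l q).1, (pvWL_getD players l q).2, pvNetFold_getD]
    rfl
  simp only [zero_add]
  exact Finset.sum_congr rfl hsum

-- ===== VERDICT (by name: the statement is the Claim_ definition above) =====
theorem compute_buchholz_wl_spec : Claim_equal_compute_buchholz_wl := by
  intro players match_log _ _
  unfold Spec_compute_buchholz_wl compute_buchholz_wl compute_buchholz_wl_alt
  have hkA : (pvOutA players (pvOpponents match_log) (pvWL players match_log)).keys
      = PySem.Set.ofList players := pvOutA_keys players _ _
  have hkB : ((match_log.foldl (pvEdgeStep (pvNetFold match_log))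
      (PySem.Set.empty, pvInit0 players)).2).keys = PySem.Set.ofList players := by
    rw [pvEdgeFold_keys]
    exact pvInit0_keys players
  have ndA : (pvOutA players (pvOpponents match_log) (pvWL players match_log)).keys.Nodup := by
    rw [hkA]; exact PySem.Set.nodup_ofList players
  have ndB : ((match_log.foldl (pvEdgeStep (pvNetFold match_log))
      (PySem.Set.empty, pvInit0 players)).2).keys.Nodup := by
    rw [hkB]; exact PySem.Set.nodup_ofList players
  rw [PySem.Dict.items_eq_map_keys _ ndA 0, PySem.Dict.items_eq_map_keys _ ndB 0, hkA, hkB]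
  apply List.map_congr_left
  intro k hk
  have hkp : k ∈ players := by simpa [PySem.Set.mem_ofList] using hk
  simp only [Prod.mk.injEq]
  exact ⟨trivial, pv_value_eq players match_log k hkp⟩
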